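-- pv_equiv track=rewrite | github.com/Mahdi-CV/open_type_faster | stats.py | _count_completed_words
-- ===== SOURCE A (Python) =====
-- def _count_completed_words(target: str, typed: list[str]) -> int:
--     """Count words the user typed in full (correctly or not)."""
--     typed_str = "".join(typed)
--     words = target.split()
--     pos = 0
--     completed = 0
--
--     for word in words:
--         end = pos + len(word)
--         if end <= len(typed_str):
--             completed += 1
--         else:
--             break
--         pos = end + 1  # +1 for the space
--
--     return completed
-- ===== SOURCE B (Python) =====
-- def _count_completed_words(target: str, typed: list[str]) -> int:
--     """Count words the user typed in full (correctly or not).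
--
--     Build the cumulative word-end positions once, then binary-search for
--     the typed length instead of scanning words with a break.
--     """
--     typed_len = len("".join(typed))
--     ends = []
--     total = 0
--     for word in target.split():
--         total += len(word) + 1  # word plus its separating space
--         ends.append(total - 1)  # end position of this word
--     # ends is strictly increasing: count of ends <= typed_len by bisection
--     lo, hi = 0, len(ends)
--     while lo < hi:
--         mid = (lo + hi) // 2
--         if typed_len < ends[mid]:
--             hi = mid
--         else:
--             lo = mid + 1
--     return lo
-- ===== Notes on version B (the rewrite author's own statement) =====
-- stated objective: alternative
-- what changed: Replaces the word-by-word scan with break by building the cumulative word-end positions once and locating the typed length in that strictly increasing list with a hand-written binary search (bisect_right).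
import Mathlib
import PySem

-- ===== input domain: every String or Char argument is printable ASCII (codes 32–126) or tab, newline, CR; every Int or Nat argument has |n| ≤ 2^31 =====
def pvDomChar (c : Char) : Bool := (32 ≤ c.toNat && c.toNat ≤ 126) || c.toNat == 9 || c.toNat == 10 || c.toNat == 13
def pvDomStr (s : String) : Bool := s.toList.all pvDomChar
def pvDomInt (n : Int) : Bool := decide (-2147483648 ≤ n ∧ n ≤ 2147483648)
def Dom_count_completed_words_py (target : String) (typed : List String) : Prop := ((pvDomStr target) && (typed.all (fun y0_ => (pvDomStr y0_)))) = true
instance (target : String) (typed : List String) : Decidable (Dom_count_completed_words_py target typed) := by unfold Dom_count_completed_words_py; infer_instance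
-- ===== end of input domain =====

-- B replaces A's scan-with-break over the words by cumulative end positions plus a binary search; alternative decomposition, same result.


-- ===== PORT A =====
-- the for-loop over words with early break, carrying pos and completed
def pvALoop (L : Int) : List String → Int → Int → Int
  | [], _, completed => completed
  | w :: ws, pos, completed =>
    let e := pos + PySem.Str.len w
    if e ≤ L then pvALoop L ws (e + 1) (completed + 1)
    else completed

def count_completed_words_py (target : String) (typed : List String) : Int :=
  let typed_str := PySem.Str.join "" typed
  let words := PySem.Str.split₀ target
  pvALoop (PySem.Str.len typed_str) words 0 0

-- ===== PORT B =====
-- the loop building the cumulative end-position list `ends`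
def pvBEnds : List String → Int → List Int
  | [], _ => []
  | w :: ws, total =>
    let t := total + PySem.Str.len w + 1
    (t - 1) :: pvBEnds ws t

-- the hand-written bisect_right while-loop; ends[mid] is always in range when lo < hi ≤ len
def pvBsearch (ends : List Int) (L : Int) (lo hi : Nat) : Nat :=
  if _h : lo < hi then
    let mid := (lo + hi) / 2
    if L < ends.getD mid 0 then pvBsearch ends L lo mid
    else pvBsearch ends L (mid + 1) hi
  else lo
termination_by hi - lo
decreasing_by all_goals omega

def count_completed_words_py_alt (target : String) (typed : List String) : Int :=
  let typed_len := PySem.Str.len (PySem.Str.join "" typed)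
  let ends := pvBEnds (PySem.Str.split₀ target) 0
  ((pvBsearch ends typed_len 0 ends.length : Nat) : Int)

-- ===== PRECONDITION & SPEC =====
def Spec_count_completed_words_py (target : String) (typed : List String) (out : Int) : Prop := out = count_completed_words_py_alt target typed
instance (target : String) (typed : List String) (out : Int) : Decidable (Spec_count_completed_words_py target typed out) := by unfold Spec_count_completed_words_py; infer_instance

-- ===== CLAIM (what is proved, stated in full; the proofs are below) =====
def Claim_equal_count_completed_words_py : Prop := ∀ (target : String) (typed : List String), Dom_count_completed_words_py target typed → Spec_count_completed_words_py target typed (count_completed_words_py target typed)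

-- ===== LEMMAS AND PROOFS =====

-- every element of the ends list is strictly greater than the running total it starts from... at least total
lemma pvBEnds_mem_le : ∀ (ws : List String) (t x : Int), x ∈ pvBEnds ws t → t ≤ x := by
  intro ws
  induction ws with
  | nil => intro t x hx; simp [pvBEnds] at hx
  | cons w ws ih =>
    intro t x hx
    simp only [pvBEnds, List.mem_cons, PySem.Str.len_eq] at hx
    rcases hx with h | h
    · omega
    · have := ih _ _ h
      omega

-- A's loop counts exactly the ends ≤ L
lemma pvALoop_eq_countP (L : Int) : ∀ (ws : List String) (pos c : Int),
    pvALoop L ws pos c = c + ((pvBEnds ws pos).countP (fun e => decide (e ≤ L)) : Int) := by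
  intro ws
  induction ws with
  | nil => intro pos c; simp [pvALoop, pvBEnds]
  | cons w ws ih =>
    intro pos c
    simp only [pvALoop, pvBEnds, PySem.Str.len_eq]
    have he : pos + (w.toList.length : Int) + 1 - 1 = pos + (w.toList.length : Int) := by ring
    by_cases h : pos + (w.toList.length : Int) ≤ L
    · rw [if_pos h, ih, he, List.countP_cons]
      have h' : pos + (w.length : Int) ≤ L := by simpa using h
      simp [h']
      ring
    · rw [if_neg h]
      have hzero : (pvBEnds ws (pos + (w.toList.length : Int) + 1)).countP (fun e => decide (e ≤ L)) = 0 := by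
        rw [List.countP_eq_zero]
        intro x hx
        have hle := pvBEnds_mem_le ws _ x hx
        simp only [decide_eq_true_eq]
        omega
      rw [he, List.countP_cons, hzero]
      simp only [zero_add]
      have h' : L < pos + (w.length : Int) := by simp at h; omega
      simp [h']

-- ends lists are strictly increasing
lemma pvBEnds_pairwise : ∀ (ws : List String) (t : Int), (pvBEnds ws t).Pairwise (· < ·) := by
  intro ws
  induction ws with
  | nil => intro t; simp [pvBEnds]
  | cons w ws ih =>
    intro t
    simp only [pvBEnds, List.pairwise_cons]
    refine ⟨?_, ih _⟩
    intro x hx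
    have := pvBEnds_mem_le ws _ x hx
    omega

-- binary-search invariant: the result separates the ≤L prefix from the >L suffix
lemma pvBsearch_inv (ends : List Int) (L : Int)
    (mono : ∀ i j, i ≤ j → j < ends.length → ends.getD i 0 ≤ ends.getD j 0) :
    ∀ lo hi, lo ≤ hi → hi ≤ ends.length →
    (∀ i, i < lo → ends.getD i 0 ≤ L) →
    (∀ i, hi ≤ i → i < ends.length → L < ends.getD i 0) →
    (pvBsearch ends L lo hi ≤ ends.length ∧
      (∀ i, i < pvBsearch ends L lo hi → ends.getD i 0 ≤ L) ∧
      (∀ i, pvBsearch ends L lo hi ≤ i → i < ends.length → L < ends.getD i 0)) := by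
  intro lo hi
  induction hn : hi - lo using Nat.strong_induction_on generalizing lo hi with
  | _ n ih =>
    intro hlohi hhilen hlow hhigh
    rw [pvBsearch]
    by_cases h : lo < hi
    · rw [dif_pos h]
      set mid := (lo + hi) / 2 with hmid
      have hmlt : mid < hi := by omega
      have hmge : lo ≤ mid := by omega
      by_cases hc : L < ends.getD mid 0
      · rw [if_pos hc]
        exact ih (mid - lo) (by omega) lo mid rfl (by omega) (by omega) hlow
          (fun i hi1 hi2 => lt_of_lt_of_le hc (mono mid i hi1 hi2))
      · rw [if_neg hc]
        exact ih (hi - (mid + 1)) (by omega) (mid + 1) hi rfl (by omega) hhilen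
          (fun i hi1 => le_trans (mono i mid (by omega) (by omega)) (by omega)) hhigh
    · rw [dif_neg h]
      have : lo = hi := by omega
      subst this
      exact ⟨hhilen, hlow, hhigh⟩

-- a number separating the ≤L prefix from the >L suffix equals countP (≤ L)
lemma countP_eq_of_sep (L : Int) : ∀ (ends : List Int) (k : Nat), k ≤ ends.length →
    (∀ i, i < k → ends.getD i 0 ≤ L) →
    (∀ i, k ≤ i → i < ends.length → L < ends.getD i 0) →
    ends.countP (fun e => decide (e ≤ L)) = k := by
  intro ends
  induction ends with
  | nil => intro k hk _ _; simp at hk ⊢; omega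
  | cons a tl ih =>
    intro k hk hlow hhigh
    cases k with
    | zero =>
      rw [List.countP_eq_zero]
      intro x hx
      simp only [decide_eq_true_eq]
      rcases List.mem_cons.mp hx with rfl | hmem
      · have := hhigh 0 (by omega) (by simp)
        simp at this
        omega
      · obtain ⟨j, hj, rfl⟩ := List.mem_iff_getElem.mp hmem
        have := hhigh (j + 1) (by omega) (by simp; omega)
        simp only [List.getD_eq_getElem?_getD] at this
        rw [List.getElem?_cons_succ] at this
        rw [List.getElem?_eq_getElem hj] at this
        simp at this
        omega
    | succ k' =>
      rw [List.countP_cons]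
      have ha : a ≤ L := by
        have := hlow 0 (by omega)
        simpa using this
      have htl : tl.countP (fun e => decide (e ≤ L)) = k' := by
        apply ih
        · simp at hk; omega
        · intro i hi
          have := hlow (i + 1) (by omega)
          simp only [List.getD_eq_getElem?_getD, List.getElem?_cons_succ] at this
          simpa using this
        · intro i hi1 hi2
          have := hhigh (i + 1) (by omega) (by simp; omega)
          simp only [List.getD_eq_getElem?_getD, List.getElem?_cons_succ] at this
          simpa using this
      simp [ha, htl]

lemma pvBEnds_mono (ws : List String) (t : Int) :
    ∀ i j, i ≤ j → j < (pvBEnds ws t).length →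
      (pvBEnds ws t).getD i 0 ≤ (pvBEnds ws t).getD j 0 := by
  intro i j hij hj
  have hp := pvBEnds_pairwise ws t
  rcases Nat.lt_or_ge i j with h | h
  · have := (List.pairwise_iff_getElem.mp hp) i j (by omega) hj h
    rw [List.getD_eq_getElem _ _ (by omega), List.getD_eq_getElem _ _ hj]
    omega
  · have : i = j := by omega
    subst this
    exact le_refl _

-- ===== VERDICT (by name: the statement is the Claim_ definition above) =====
theorem count_completed_words_py_spec : Claim_equal_count_completed_words_py := by
  intro target typed _hdom
  unfold Spec_count_completed_words_py count_completed_words_py count_completed_words_py_alt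
  set L := PySem.Str.len (PySem.Str.join "" typed) with hL
  set ends := pvBEnds (PySem.Str.split₀ target) 0 with hends
  rw [pvALoop_eq_countP]
  obtain ⟨h1, h2, h3⟩ := pvBsearch_inv ends L (pvBEnds_mono _ _) 0 ends.length
    (by omega) (le_refl _) (by omega) (by intro i h1 h2; omega)
  rw [countP_eq_of_sep L ends _ h1 h2 h3]
  simp
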